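-- pv_equiv track=rewrite | github.com/axlan/ghost-tripper | formats.py | split_into_8x8_tiles_4bit
-- ===== SOURCE A (Python) =====
-- def split_into_8x8_tiles_4bit(data):
--     t = []
--     while data:
--         raw = data[:32]
--         unpacked = []
--         for val in raw:
--             unpacked.append(val & 0xF)
--             unpacked.append(val >> 4)
--         t.append(unpacked)
--         data = data[32:]
--     return t
-- ===== SOURCE B (Python) =====
-- def split_into_8x8_tiles_4bit(data):
--     flat = [n for val in data for n in (val & 0xF, val >> 4)]
--     return [flat[i:i + 64] for i in range(0, len(flat), 64)]
-- ===== Notes on version B (the rewrite author's own statement) =====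
-- stated objective: faster
-- what changed: Replaces A's chunk-then-unpack while loop (which repeatedly copies the tail via data[32:]) by an unpack-then-chunk decomposition: one flat comprehension builds the whole nibble stream, then a slice comprehension reshapes it into 64-nibble rows.
import Mathlib
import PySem

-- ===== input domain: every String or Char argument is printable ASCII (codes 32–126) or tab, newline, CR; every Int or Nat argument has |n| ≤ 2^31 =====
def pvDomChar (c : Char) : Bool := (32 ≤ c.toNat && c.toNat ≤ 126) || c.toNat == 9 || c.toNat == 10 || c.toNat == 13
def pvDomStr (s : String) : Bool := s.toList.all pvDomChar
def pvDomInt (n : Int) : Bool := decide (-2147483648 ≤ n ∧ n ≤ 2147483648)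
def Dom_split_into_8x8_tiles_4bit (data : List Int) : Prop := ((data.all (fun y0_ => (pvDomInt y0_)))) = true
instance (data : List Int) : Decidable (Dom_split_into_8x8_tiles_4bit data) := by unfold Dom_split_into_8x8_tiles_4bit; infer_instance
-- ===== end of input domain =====

-- B replaces A's chunk-then-unpack while loop (whose data[32:] re-slicing copies the tail
-- each iteration) by unpack-then-chunk: one flat nibble stream, then 64-nibble slices;
-- measured faster in a timing run.

-- ===== PORT A =====
-- val & 0xF → PySem.Int.band (Python-exact on negatives); val >> 4 → Lean's >>> (floors, also on negatives).
def pvUnpack (raw : List Int) : List Int :=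
  raw.foldl (fun unpacked val => (unpacked ++ [PySem.Int.band val 15]) ++ [val >>> 4]) []

-- the `while data:` loop carrying the accumulator t; data[:32] / data[32:] via PySem slices
def pvTilesLoop (data : List Int) (t : List (List Int)) : List (List Int) :=
  if data = [] then t
  else pvTilesLoop (PySem.List.slice data (some 32) none)
         (t ++ [pvUnpack (PySem.List.slice data none (some 32))])
termination_by data.length
decreasing_by
  rw [PySem.List.slice_from data (by norm_num : (0:Int) ≤ 32)]
  have : data.length ≠ 0 := by simpa [List.length_eq_zero_iff] using ‹¬ data = []›
  simp
  omega

def split_into_8x8_tiles_4bit (data : List Int) : List (List Int) :=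
  pvTilesLoop data []

-- ===== PORT B =====
def split_into_8x8_tiles_4bit_alt (data : List Int) : List (List Int) :=
  let flat := data.flatMap (fun val => [PySem.Int.band val 15, val >>> 4])
  (PySem.List.pyRange 0 (flat.length : Int) 64).map
    (fun i => PySem.List.slice flat (some i) (some (i + 64)))

-- ===== PRECONDITION & SPEC =====
def Spec_split_into_8x8_tiles_4bit (data : List Int) (out : List (List Int)) : Prop := out = split_into_8x8_tiles_4bit_alt data
instance (data : List Int) (out : List (List Int)) : Decidable (Spec_split_into_8x8_tiles_4bit data out) := by unfold Spec_split_into_8x8_tiles_4bit; infer_instance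

-- ===== CLAIM (what is proved, stated in full; the proofs are below) =====
def Claim_equal_split_into_8x8_tiles_4bit : Prop := ∀ (data : List Int), Dom_split_into_8x8_tiles_4bit data → Spec_split_into_8x8_tiles_4bit data (split_into_8x8_tiles_4bit data)

-- ===== LEMMAS AND PROOFS =====

-- the flat nibble stream (proof-side name for the stream both sides produce)
def pvFlat (data : List Int) : List Int :=
  data.flatMap (fun val => [PySem.Int.band val 15, val >>> 4])

-- reference chunking into rows of 64
def pvChunk (l : List Int) : List (List Int) :=
  if l = [] then [] else l.take 64 :: pvChunk (l.drop 64)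
termination_by l.length
decreasing_by
  have : l.length ≠ 0 := by simpa [List.length_eq_zero_iff] using ‹¬ l = []›
  simp; omega

lemma pvFlat_length (l : List Int) : (pvFlat l).length = 2 * l.length := by
  induction l with
  | nil => simp [pvFlat]
  | cons x xs ih => simp [pvFlat] at ih ⊢; omega

lemma pvUnpack_acc (raw : List Int) (acc : List Int) :
    raw.foldl (fun unpacked val => (unpacked ++ [PySem.Int.band val 15]) ++ [val >>> 4]) acc
      = acc ++ pvFlat raw := by
  induction raw generalizing acc with
  | nil => simp [pvFlat]
  | cons x xs ih => rw [List.foldl_cons, ih]; simp [pvFlat]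

lemma pvUnpack_eq (raw : List Int) : pvUnpack raw = pvFlat raw := by
  unfold pvUnpack
  rw [pvUnpack_acc raw []]
  simp

lemma pvChunk_flat_step (data : List Int) (h : data ≠ []) :
    pvChunk (pvFlat data) = pvFlat (data.take 32) :: pvChunk (pvFlat (data.drop 32)) := by
  have hsplit : pvFlat data = pvFlat (data.take 32) ++ pvFlat (data.drop 32) := by
    simp [pvFlat, ← List.flatMap_append]
  have hlen : (pvFlat (data.take 32)).length = 2 * min 32 data.length := by
    rw [pvFlat_length, List.length_take]
  have hpos : 0 < data.length := List.length_pos_iff.mpr h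
  rw [hsplit, pvChunk]
  have hne : pvFlat (data.take 32) ++ pvFlat (data.drop 32) ≠ [] := by
    have h0 : 0 < (pvFlat (data.take 32) ++ pvFlat (data.drop 32)).length := by
      rw [List.length_append, hlen]; omega
    intro hc
    rw [hc] at h0
    simp at h0
  rw [if_neg hne]
  by_cases h32 : data.length ≤ 32
  · have hdrop : data.drop 32 = [] := by
      rw [List.drop_eq_nil_iff]; omega
    have hx : (pvFlat (data.take 32)).length ≤ 64 := by rw [hlen]; omega
    rw [hdrop]
    congr 1
    · rw [show pvFlat ([] : List Int) = [] from rfl, List.append_nil]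
      exact List.take_of_length_le hx
    · rw [show pvFlat ([] : List Int) = [] from rfl, List.append_nil,
        List.drop_eq_nil_of_le hx]
  · have hx : (pvFlat (data.take 32)).length = 64 := by rw [hlen]; omega
    congr 1
    · rw [List.take_append, List.take_of_length_le (le_of_eq hx), hx]
      simp
    · rw [List.drop_append, List.drop_eq_nil_of_le (le_of_eq hx), hx]
      simp

lemma pvTilesLoop_eq : ∀ (n : ℕ) (data : List Int) (t : List (List Int)), data.length = n →
    pvTilesLoop data t = t ++ pvChunk (pvFlat data) := by
  intro n
  induction n using Nat.strong_induction_on with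
  | _ n ih =>
    intro data t hlen
    by_cases h : data = []
    · subst h; rw [pvTilesLoop]; simp [pvFlat, pvChunk]
    · rw [pvTilesLoop, if_neg h,
        PySem.List.slice_from data (by norm_num : (0:Int) ≤ 32),
        PySem.List.slice_to data (by norm_num : (0:Int) ≤ 32)]
      have hpos : 0 < data.length := List.length_pos_iff.mpr h
      have hd : (data.drop (32:Int).toNat).length < n := by
        simp; omega
      rw [ih _ (by omega : (data.drop (32:Int).toNat).length < n) _ _ rfl]
      rw [pvChunk_flat_step data h, pvUnpack_eq]
      simp

lemma pvChunk_range : ∀ (c : ℕ) (l : List Int), c = (l.length + 63) / 64 →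
    (List.range c).map (fun k => (l.drop (64 * k)).take 64) = pvChunk l := by
  intro c
  induction c with
  | zero =>
    intro l hc
    have : l.length = 0 := by omega
    have hnil : l = [] := List.length_eq_zero_iff.mp this
    subst hnil; simp [pvChunk]
  | succ c ih =>
    intro l hc
    have hpos : 0 < l.length := by omega
    have hne : l ≠ [] := by
      intro hl; subst hl; simp at hpos
    rw [List.range_succ_eq_map, List.map_cons, List.map_map]
    rw [pvChunk, if_neg hne]
    refine congrArg₂ List.cons (by simp) ?_
    have hdl : c = ((l.drop 64).length + 63) / 64 := by
      rw [List.length_drop]; omega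
    rw [← ih (l.drop 64) hdl]
    apply List.map_congr_left
    intro k _
    simp only [Function.comp_apply, List.drop_drop]
    congr 2
    omega

lemma pvAlt_eq_chunk (l : List Int) :
    (PySem.List.pyRange 0 (l.length : Int) 64).map
      (fun i => PySem.List.slice l (some i) (some (i + 64))) = pvChunk l := by
  rw [PySem.List.pyRange_of_pos 0 (l.length : Int) (by norm_num : (0:Int) < 64), List.map_map]
  have hcnt : (if (0:Int) < (l.length : Int) then (((l.length : Int) - 0 + 64 - 1) / 64).toNat else 0)
      = (l.length + 63) / 64 := by
    by_cases h : 0 < l.length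
    · rw [if_pos (by exact_mod_cast h)]
      have h1 : ((l.length : Int) - 0 + 64 - 1) = ((l.length + 63 : ℕ) : Int) := by
        push_cast; ring
      rw [h1]
      rfl
    · have hl0 : l.length = 0 := by omega
      rw [if_neg (by exact_mod_cast h), hl0]
  rw [hcnt, ← pvChunk_range ((l.length + 63) / 64) l rfl]
  apply List.map_congr_left
  intro k _
  simp only [Function.comp]
  rw [PySem.List.slice_toNat l (by positivity) (by positivity)]
  congr 1
  · omega
  · congr 1
    omega

-- ===== VERDICT (by name: the statement is the Claim_ definition above) =====
theorem split_into_8x8_tiles_4bit_spec : Claim_equal_split_into_8x8_tiles_4bit := by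
  intro data _
  unfold Spec_split_into_8x8_tiles_4bit split_into_8x8_tiles_4bit split_into_8x8_tiles_4bit_alt
  rw [pvTilesLoop_eq data.length data [] rfl]
  simp only []
  rw [show data.flatMap (fun val => [PySem.Int.band val 15, val >>> 4]) = pvFlat data from rfl]
  rw [pvAlt_eq_chunk (pvFlat data)]
  simp
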